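-- pv_equiv track=rewrite | github.com/khand420/SDE-PREP | 01_PYTHON_COMPANY_QUES/company/gorilladebug.py | convert_digits
-- ===== SOURCE A (Python) =====
-- def convert_digits(input_string, start_position, end_position):
-- 	# Adjust for 0-based indexing
-- 	start_position -= 1
-- 	end_position -= 1
--
-- 	# Check for invalid conditions
-- 	if start_position > end_position:
-- 		return "INVALID"
-- 	if start_position < 0:
-- 		return "INVALID"
-- 	if end_position >= len(input_string):
-- 		return "INVALID"
--
-- 	new_string = ""
-- 	digit_mapping = {
-- 		'0': 'ZERO',
-- 		'1': 'ONE',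
-- 		'2': 'TWO',
-- 		'3': 'THREE',
-- 		'4': 'FOUR',
-- 		'5': 'FIVE',
-- 		'6': 'SIX',
-- 		'7': 'SEVEN',
-- 		'8': 'EIGHT',
-- 		'9': 'NINE'
-- 	}
--
-- 	# Build the new string with digit conversions
-- 	for index in range(len(input_string)):
-- 		if start_position <= index <= end_position and input_string[index].isdigit():
-- 			new_string += digit_mapping[input_string[index]]
-- 		else:
-- 			new_string += input_string[index]
--
-- 	return new_string
-- ===== SOURCE B (Python) =====
-- def convert_digits(input_string, start_position, end_position):
-- 	# Adjust for 0-based indexing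
-- 	start_position -= 1
-- 	end_position -= 1
--
-- 	# Validation (same three invalid conditions as a single test)
-- 	if start_position > end_position or start_position < 0 or end_position >= len(input_string):
-- 		return "INVALID"
--
-- 	words = {
-- 		'0': 'ZERO', '1': 'ONE', '2': 'TWO', '3': 'THREE', '4': 'FOUR',
-- 		'5': 'FIVE', '6': 'SIX', '7': 'SEVEN', '8': 'EIGHT', '9': 'NINE'
-- 	}
--
-- 	# Slice into three segments and convert only the middle one
-- 	prefix = input_string[:start_position]
-- 	middle = input_string[start_position:end_position + 1]
-- 	suffix = input_string[end_position + 1:]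
-- 	converted = "".join(words.get(ch, ch) for ch in middle)
-- 	return prefix + converted + suffix
-- ===== Notes on version B (the rewrite author's own statement) =====
-- stated objective: simpler
-- what changed: Replaces the index-guarded pass over the whole string (per-index range check inside the loop) with a three-way slice: prefix and suffix are copied untouched and only the middle slice is mapped through words.get(ch, ch), with the three validity guards merged into one test.
import Mathlib
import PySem

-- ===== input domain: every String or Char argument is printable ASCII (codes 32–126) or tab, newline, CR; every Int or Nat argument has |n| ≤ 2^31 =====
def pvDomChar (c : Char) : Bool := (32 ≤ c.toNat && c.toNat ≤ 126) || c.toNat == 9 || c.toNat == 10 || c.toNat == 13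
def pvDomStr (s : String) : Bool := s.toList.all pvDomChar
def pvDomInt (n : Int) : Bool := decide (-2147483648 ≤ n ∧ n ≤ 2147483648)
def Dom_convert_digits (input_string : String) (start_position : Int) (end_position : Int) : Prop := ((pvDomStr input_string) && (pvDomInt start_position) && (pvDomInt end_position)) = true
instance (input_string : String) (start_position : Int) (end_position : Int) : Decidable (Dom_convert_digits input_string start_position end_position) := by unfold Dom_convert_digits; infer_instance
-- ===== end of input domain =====

-- B replaces A's index-guarded full-string pass by prefix/middle/suffix slicing, converting only the middle (objective: simpler).

-- the digit→word table both Pythons carry as a literal dict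
def pvDigitMap : PySem.Dict Char (List Char) :=
  PySem.Dict.ofList [('0', "ZERO".toList), ('1', "ONE".toList), ('2', "TWO".toList),
    ('3', "THREE".toList), ('4', "FOUR".toList), ('5', "FIVE".toList), ('6', "SIX".toList),
    ('7', "SEVEN".toList), ('8', "EIGHT".toList), ('9', "NINE".toList)]

-- ===== PORT A =====
-- literal port: adjust indices, three guards in order, then one loop over range(len(input_string))
-- appending either the mapped word or the character itself.  dict[key] is only reached when
-- isdigit holds, so the key is present and `(get? _).getD []` is exact (KeyError unreachable).
def convert_digits (input_string : String) (start_position : Int) (end_position : Int) : String :=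
  let start_position := start_position - 1
  let end_position := end_position - 1
  if start_position > end_position then "INVALID"
  else if start_position < 0 then "INVALID"
  else if end_position ≥ PySem.Str.len input_string then "INVALID"
  else
    let cs := input_string.toList
    let new_string :=
      (PySem.List.pyRange 0 (PySem.Str.len input_string)).foldl
        (fun acc index =>
          if start_position ≤ index ∧ index ≤ end_position ∧
              PySem.Chars.isdigit (PySem.List.pyGetD cs index ' ') = true then
            acc ++ (pvDigitMap.get? (PySem.List.pyGetD cs index ' ')).getD []
          else
            acc ++ [PySem.List.pyGetD cs index ' ']) []
    String.mk new_string

-- ===== PORT B =====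
-- literal port of Source B: one merged guard, three slices, ''.join over the middle = flatMap.
def convert_digits_alt (input_string : String) (start_position : Int) (end_position : Int) : String :=
  let start_position := start_position - 1
  let end_position := end_position - 1
  if start_position > end_position ∨ start_position < 0 ∨
      end_position ≥ PySem.Str.len input_string then "INVALID"
  else
    let cs := input_string.toList
    let pre := PySem.List.slice cs none (some start_position)
    let mid := PySem.List.slice cs (some start_position) (some (end_position + 1))
    let suf := PySem.List.slice cs (some (end_position + 1)) none
    let converted := mid.flatMap (fun ch => (pvDigitMap.get? ch).getD [ch])
    String.mk (pre ++ converted ++ suf)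

-- ===== PRECONDITION & SPEC =====
def Spec_convert_digits (input_string : String) (start_position : Int) (end_position : Int) (out : String) : Prop := out = convert_digits_alt input_string start_position end_position
instance (input_string : String) (start_position : Int) (end_position : Int) (out : String) : Decidable (Spec_convert_digits input_string start_position end_position out) := by unfold Spec_convert_digits; infer_instance

-- ===== CLAIM (what is proved, stated in full; the proofs are below) =====
def Claim_equal_convert_digits : Prop := ∀ (input_string : String) (start_position : Int) (end_position : Int), Dom_convert_digits input_string start_position end_position → Spec_convert_digits input_string start_position end_position (convert_digits input_string start_position end_position)

-- ===== LEMMAS AND PROOFS =====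

-- an ASCII-range digit is one of the ten digit characters
lemma pv_digit_cases (c : Char) (h : PySem.Chars.isdigit c = true) :
    c = '0' ∨ c = '1' ∨ c = '2' ∨ c = '3' ∨ c = '4' ∨
    c = '5' ∨ c = '6' ∨ c = '7' ∨ c = '8' ∨ c = '9' := by
  simp only [PySem.Chars.isdigit, Bool.and_eq_true, decide_eq_true_eq] at h
  obtain ⟨h1, h2⟩ := h
  have hl : 48 ≤ c.toNat := h1
  have hr : c.toNat ≤ 57 := h2
  have hofn : Char.ofNat c.toNat = c := Char.ofNat_toNat c
  interval_cases h : c.toNat <;> rw [← hofn] <;> decide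

-- A's per-character action equals B's `words.get(ch, ch)`
lemma pv_char_eq (c : Char) :
    (if PySem.Chars.isdigit c = true then (pvDigitMap.get? c).getD [] else [c]) =
      (pvDigitMap.get? c).getD [c] := by
  by_cases h : PySem.Chars.isdigit c = true
  · rcases pv_digit_cases c h with rfl|rfl|rfl|rfl|rfl|rfl|rfl|rfl|rfl|rfl <;> rfl
  · have hne : ∀ d : Char, PySem.Chars.isdigit d = true → (d == c) = false := by
      intro d hd
      rw [beq_eq_false_iff_ne]
      rintro rfl
      exact h hd
    simp only [h]
    have hmk : pvDigitMap = PySem.Dict.mk [('0', "ZERO".toList), ('1', "ONE".toList),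
        ('2', "TWO".toList), ('3', "THREE".toList), ('4', "FOUR".toList), ('5', "FIVE".toList),
        ('6', "SIX".toList), ('7', "SEVEN".toList), ('8', "EIGHT".toList), ('9', "NINE".toList)] := by
      decide
    have : pvDigitMap.get? c = none := by
      rw [hmk]
      simp [PySem.Dict.get?_mk_cons,
        hne '0' (by decide), hne '1' (by decide), hne '2' (by decide), hne '3' (by decide),
        hne '4' (by decide), hne '5' (by decide), hne '6' (by decide), hne '7' (by decide),
        hne '8' (by decide), hne '9' (by decide)]
      rfl
    simp [this]

-- reading a range of in-bounds indices is slicing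
lemma pv_map_seg (cs : List Char) (d : Char) (a b : Int)
    (h0 : 0 ≤ a) (hab : a ≤ b) (hb : b ≤ (cs.length : Int)) :
    (PySem.List.pyRange a b).map (fun i => PySem.List.pyGetD cs i d) =
      (cs.drop a.toNat).take (b.toNat - a.toNat) := by
  rw [PySem.List.pyRange_one, List.map_map]
  apply List.ext_getElem
  · simp
    omega
  · intro k hk1 hk2
    simp only [List.getElem_map, List.getElem_range, Function.comp_apply]
    rw [List.getElem_take, List.getElem_drop]
    rw [PySem.List.pyGetD_eq_getElem cs d (by simp at hk1; omega) (by simp at hk1; omega)]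
    congr 1
    simp at hk1
    omega

-- flatMap of singletons is map
lemma pv_flatMap_singleton {α β : Type} (f : α → β) (l : List α) :
    l.flatMap (fun x => [f x]) = l.map f := by
  rw [← List.flatMap_map f (fun x => [x]) l, List.flatMap_singleton']

-- the accumulator-append loop is a flatMap
lemma pv_foldl_ite_append {α β : Type} (p : α → Prop) [DecidablePred p]
    (f g : α → List β) (l : List α) (acc : List β) :
    l.foldl (fun acc x => if p x then acc ++ f x else acc ++ g x) acc =
      acc ++ l.flatMap (fun x => if p x then f x else g x) := by
  have hfun : (fun (acc : List β) x => if p x then acc ++ f x else acc ++ g x) =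
      (fun acc x => acc ++ (if p x then f x else g x)) := by
    funext acc x
    split <;> rfl
  rw [hfun, PySem.List.foldl_append_eq_flatMap]

-- ===== VERDICT (by name: the statement is the Claim_ definition above) =====
theorem convert_digits_spec : Claim_equal_convert_digits := by
  intro s sp0 ep0 _
  unfold Spec_convert_digits convert_digits convert_digits_alt
  set sp := sp0 - 1 with hsp
  set ep := ep0 - 1 with hep
  by_cases h1 : sp > ep
  · simp [h1]
  by_cases h2 : sp < 0
  · simp [h1, h2]
  by_cases h3 : ep ≥ PySem.Str.len s
  · have h3' : ((s.length : Int)) ≤ ep := by simpa [PySem.Str.len_eq, ge_iff_le] using h3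
    simp [h1, h2, h3']
  simp only [h1, h2, h3, if_false]
  have hlen : PySem.Str.len s = (s.toList.length : Int) := by simp [PySem.Str.len_eq]
  have hsp0 : (0:Int) ≤ sp := by omega
  have hspep : sp ≤ ep + 1 := by omega
  have hepl : ep + 1 ≤ (s.toList.length : Int) := by omega
  rw [pv_foldl_ite_append]
  rw [List.nil_append]
  rw [hlen]
  rw [List.append_assoc]
  rw [PySem.List.pyRange_one_append 0 sp _ hsp0 (by omega),
      PySem.List.pyRange_one_append sp (ep + 1) _ hspep hepl,
      List.flatMap_append, List.flatMap_append]
  congr 1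
  congr 1
  · -- prefix: indices below sp are copied verbatim
    rw [PySem.List.slice_to s.toList hsp0]
    have hcongr : (PySem.List.pyRange 0 sp).flatMap
        (fun i => if sp ≤ i ∧ i ≤ ep ∧ PySem.Chars.isdigit (PySem.List.pyGetD s.toList i ' ') = true
          then (pvDigitMap.get? (PySem.List.pyGetD s.toList i ' ')).getD []
          else [PySem.List.pyGetD s.toList i ' ']) =
        (PySem.List.pyRange 0 sp).flatMap (fun i => [PySem.List.pyGetD s.toList i ' ']) := by
      apply List.flatMap_congr
      intro i hi
      rw [PySem.List.mem_pyRange_one] at hi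
      rw [if_neg (by omega)]
    rw [hcongr, pv_flatMap_singleton _ _, pv_map_seg s.toList ' ' 0 sp le_rfl hsp0 (by omega)]
    simp
  congr 1
  · -- middle: indices in [sp, ep] go through the table
    have hcongr : (PySem.List.pyRange sp (ep + 1)).flatMap
        (fun i => if sp ≤ i ∧ i ≤ ep ∧ PySem.Chars.isdigit (PySem.List.pyGetD s.toList i ' ') = true
          then (pvDigitMap.get? (PySem.List.pyGetD s.toList i ' ')).getD []
          else [PySem.List.pyGetD s.toList i ' ']) =
        (PySem.List.pyRange sp (ep + 1)).flatMap
          (fun i => (pvDigitMap.get? (PySem.List.pyGetD s.toList i ' ')).getD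
            [PySem.List.pyGetD s.toList i ' ']) := by
      apply List.flatMap_congr
      intro i hi
      rw [PySem.List.mem_pyRange_one] at hi
      have h5 : sp ≤ i := hi.1
      have h6 : i ≤ ep := by omega
      rw [← pv_char_eq (PySem.List.pyGetD s.toList i ' ')]
      by_cases hd : PySem.Chars.isdigit (PySem.List.pyGetD s.toList i ' ') = true
      · rw [if_pos ⟨h5, h6, hd⟩, if_pos hd]
      · rw [if_neg (by tauto), if_neg hd]
    rw [hcongr]
    rw [PySem.List.slice_of_nonneg s.toList hsp0 (by omega) (by omega) hepl]
    rw [← pv_map_seg s.toList ' ' sp (ep + 1) hsp0 hspep hepl, List.flatMap_map]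
  · -- suffix: indices above ep are copied verbatim
    rw [PySem.List.slice_from s.toList (by omega : (0:Int) ≤ ep + 1)]
    have hcongr : (PySem.List.pyRange (ep + 1) ((s.toList.length : Int))).flatMap
        (fun i => if sp ≤ i ∧ i ≤ ep ∧ PySem.Chars.isdigit (PySem.List.pyGetD s.toList i ' ') = true
          then (pvDigitMap.get? (PySem.List.pyGetD s.toList i ' ')).getD []
          else [PySem.List.pyGetD s.toList i ' ']) =
        (PySem.List.pyRange (ep + 1) ((s.toList.length : Int))).flatMap
          (fun i => [PySem.List.pyGetD s.toList i ' ']) := by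
      apply List.flatMap_congr
      intro i hi
      rw [PySem.List.mem_pyRange_one] at hi
      rw [if_neg (by omega)]
    rw [hcongr, pv_flatMap_singleton _ _,
      pv_map_seg s.toList ' ' (ep + 1) _ (by omega) (by omega) le_rfl]
    have : ((s.toList.length : Int)).toNat - (ep + 1).toNat = s.toList.length - (ep + 1).toNat := by
      omega
    rw [this]
    exact List.take_of_length_le (by simp)
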